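-- pv_equiv track=rewrite | github.com/siva600/DATA-STRUCTURES--V.2 | Alpha/longest_unique_sub_string.py | helper
-- ===== SOURCE A (Python) =====
-- def helper(s, start):
--     seen = set()
--     for i in range(start, len(s)):
--         if s[i] not in seen:
--             seen.add(s[i])
--         else:
--             return i-start
--     return len(s) - start
-- ===== SOURCE B (Python) =====
-- def helper(s, start):
--     chars = [s[i] for i in range(start, len(s))]
--     best = len(s) - start
--     for c in set(chars):
--         occ = [k for k, x in enumerate(chars) if x == c]
--         if len(occ) > 1:
--             best = min(best, occ[1])
--     return best
-- ===== Notes on version B (the rewrite author's own statement) =====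
-- stated objective: alternative
-- what changed: B drops A's single scan with a maintained seen-set and early return: it materialises the scanned characters, then for each distinct character collects the list of all its occurrence positions and takes the minimum second-occurrence position over all characters (default len(s)-start).
import Mathlib
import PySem

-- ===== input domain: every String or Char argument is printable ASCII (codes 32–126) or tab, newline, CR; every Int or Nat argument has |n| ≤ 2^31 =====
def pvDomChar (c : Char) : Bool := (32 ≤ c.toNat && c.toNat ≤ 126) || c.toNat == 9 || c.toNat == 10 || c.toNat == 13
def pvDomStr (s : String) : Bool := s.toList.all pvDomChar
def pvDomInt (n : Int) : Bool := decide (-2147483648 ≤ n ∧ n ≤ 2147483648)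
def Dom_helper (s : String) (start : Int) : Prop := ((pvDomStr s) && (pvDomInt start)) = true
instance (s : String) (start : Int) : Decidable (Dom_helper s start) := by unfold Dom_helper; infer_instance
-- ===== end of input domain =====

-- B replaces A's scan-with-a-seen-set (early return at the first repeat) by a per-character
-- computation: for each distinct character it collects all occurrence positions and takes the
-- minimum second-occurrence position over all characters; objective: alternative.

-- ===== PORT A =====
-- for i in range(start, len(s)): if s[i] not in seen: seen.add(s[i]) else: return i-start
-- (pyGet? = none is IndexError; the 0 returned there is unreachable under Pre_helper)
def helperA_go (cs : List Char) (lenS start : Int) : List Int → PySem.Set Char → Int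
  | [], _ => lenS - start
  | i :: rest, seen =>
    match PySem.List.pyGet? cs i with
    | none => 0
    | some c => if PySem.Set.contains seen c then i - start
                else helperA_go cs lenS start rest (PySem.Set.add seen c)

def helper (s : String) (start : Int) : Int :=
  helperA_go s.toList (s.toList.length : Int) start
    (PySem.List.pyRange start (s.toList.length : Int)) PySem.Set.empty

-- ===== PORT B =====
-- chars = [s[i] for i in range(start, len(s))]   (pyGet? none = IndexError, dropped; unreachable under Pre_helper)
def helperB_chars (cs : List Char) (start : Int) : List Char :=
  (PySem.List.pyRange start (cs.length : Int)).filterMap (PySem.List.pyGet? cs)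

-- occ = [k for k, x in enumerate(chars) if x == c]
def helperB_occ (chars : List Char) (c : Char) : List Int :=
  (PySem.List.enumerate chars 0).filterMap (fun p => if p.2 = c then some p.1 else none)

-- if len(occ) > 1: best = min(best, occ[1])   (occ[1] in range when len(occ) > 1, so .getD 0 is unreachable)
def helperB_step (chars : List Char) (best : Int) (c : Char) : Int :=
  let occ := helperB_occ chars c
  if 1 < occ.length then min best ((PySem.List.pyGet? occ 1).getD 0) else best

def helper_alt (s : String) (start : Int) : Int :=
  let chars := helperB_chars s.toList start
  (PySem.Set.ofList chars).foldl (helperB_step chars) ((s.toList.length : Int) - start)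

-- ===== PRECONDITION & SPEC =====
-- Pre_ excludes exactly the inputs where A raises IndexError (start below -len(s)).
def Pre_helper (s : String) (start : Int) : Prop := -(s.toList.length : Int) ≤ start
instance (s : String) (start : Int) : Decidable (Pre_helper s start) := by unfold Pre_helper; infer_instance

def pvWitness_helper : String × Int := ("abca", 1)

def Spec_helper (s : String) (start : Int) (out : Int) : Prop := out = helper_alt s start
instance (s : String) (start : Int) (out : Int) : Decidable (Spec_helper s start out) := by unfold Spec_helper; infer_instance

-- ===== CLAIM =====
def Claim_equal_helper : Prop := ∀ (s : String) (start : Int), Dom_helper s start → Pre_helper s start → Spec_helper s start (helper s start)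

-- ===== LEMMAS AND PROOFS =====

def fgo : List Char → List Char → Nat
  | _, [] => 0
  | pre, c :: t => if c ∈ pre then 0 else (fgo (pre ++ [c]) t) + 1
def occN (l : List Char) (c : Char) : List Nat :=
  (List.range l.length).filter (fun k => l.getD k 'a' == c)

lemma chars_len (cs : List Char) : ∀ (n : Nat) (a : Int), -(cs.length : Int) ≤ a →
    (cs.length : Int) - a ≤ n → (helperB_chars cs a).length = ((cs.length : Int) - a).toNat := by
  intro n
  induction n with
  | zero =>
    intro a ha hn
    unfold helperB_chars
    rw [PySem.List.pyRange_one_eq_nil (by omega)]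
    simp; omega
  | succ n ih =>
    intro a ha hn
    by_cases hlt : a < (cs.length : Int)
    · obtain ⟨c, hc⟩ : ∃ c, PySem.List.pyGet? cs a = some c := by
        cases h : PySem.List.pyGet? cs a with
        | none =>
          rw [PySem.List.pyGet?_eq_none_iff] at h
          exact absurd (by unfold PySem.Raise.InRange; omega) h
        | some c => exact ⟨c, rfl⟩
      unfold helperB_chars
      rw [PySem.List.pyRange_one_cons hlt]
      simp only [List.filterMap_cons, hc]
      have := ih (a + 1) (by omega) (by omega)
      unfold helperB_chars at this
      simp [this]; omega
    · unfold helperB_chars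
      rw [PySem.List.pyRange_one_eq_nil (by omega)]
      simp; omega
lemma A_eq_fgo (cs : List Char) (start : Int) (hpre : -(cs.length : Int) ≤ start) :
    ∀ (n : Nat) (a : Int) (seen : PySem.Set Char) (pre : List Char),
      start ≤ a → a ≤ (cs.length : Int) → (cs.length : Int) - a ≤ n →
      (∀ c, PySem.Set.contains seen c = true ↔ c ∈ pre) →
      helperA_go cs (cs.length : Int) start (PySem.List.pyRange a (cs.length : Int)) seen =
        (a - start) + (fgo pre (helperB_chars cs a) : Int) := by
  intro n
  induction n with
  | zero =>
    intro a seen pre ha hal hn hinv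
    unfold helperB_chars
    rw [PySem.List.pyRange_one_eq_nil (by omega)]
    simp [helperA_go, fgo]; omega
  | succ n ih =>
    intro a seen pre ha hal hn hinv
    by_cases hlt : a < (cs.length : Int)
    · obtain ⟨c, hc⟩ : ∃ c, PySem.List.pyGet? cs a = some c := by
        cases h : PySem.List.pyGet? cs a with
        | none =>
          rw [PySem.List.pyGet?_eq_none_iff] at h
          exact absurd (by unfold PySem.Raise.InRange; omega) h
        | some c => exact ⟨c, rfl⟩
      have hchars : helperB_chars cs a = c :: helperB_chars cs (a + 1) := by
        unfold helperB_chars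
        rw [PySem.List.pyRange_one_cons hlt]
        simp [hc]
      rw [PySem.List.pyRange_one_cons hlt, hchars]
      simp only [helperA_go, hc]
      by_cases hmem : c ∈ pre
      · rw [if_pos ((hinv c).mpr hmem)]
        simp [fgo, hmem]
      · rw [if_neg (by rcases h : PySem.Set.contains seen c with _|_
                       · exact Bool.false_ne_true
                       · exact absurd ((hinv c).mp h) hmem)]
        have hinv' : ∀ c', PySem.Set.contains (PySem.Set.add seen c) c' = true ↔ c' ∈ pre ++ [c] := by
          intro c'
          rw [PySem.Set.contains_iff, PySem.Set.mem_add]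
          have h' := hinv c'
          rw [PySem.Set.contains_iff] at h'
          simp [h']
        rw [ih (a + 1) _ (pre ++ [c]) (by omega) (by omega) (by omega) hinv']
        simp [fgo, hmem]
        ring
    · unfold helperB_chars
      rw [PySem.List.pyRange_one_eq_nil (by omega)]
      simp [helperA_go, fgo]; omega
lemma fgo_spec : ∀ (rest pre : List Char), pre.Nodup →
    fgo pre rest ≤ rest.length ∧ (pre ++ rest.take (fgo pre rest)).Nodup ∧
      (∀ h : fgo pre rest < rest.length, rest[fgo pre rest] ∈ pre ++ rest.take (fgo pre rest)) := by
  intro rest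
  induction rest with
  | nil => intro pre hnd; refine ⟨Nat.le_refl 0, by simpa using hnd, by intro h; simp at h⟩
  | cons c t ih =>
    intro pre hnd
    by_cases hmem : c ∈ pre
    · refine ⟨by simp [fgo, hmem], by simpa [fgo, hmem] using hnd, ?_⟩
      intro h
      simp [fgo, hmem]
    · have hnd' : (pre ++ [c]).Nodup := by
        simp [List.nodup_append, hnd]
        intro a ha h
        exact hmem (h ▸ ha)
      obtain ⟨h1, h2, h3⟩ := ih (pre ++ [c]) hnd'
      have hf : fgo pre (c :: t) = fgo (pre ++ [c]) t + 1 := by simp [fgo, hmem]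
      refine ⟨by simp [hf]; omega, ?_, ?_⟩
      · rw [hf]
        simpa [List.take_succ_cons, List.append_assoc] using h2
      · intro h
        simp only [hf] at h ⊢
        simp only [List.getElem_cons_succ, List.take_succ_cons]
        rw [List.append_cons]
        exact h3 (by simpa using h)
lemma occF : ∀ (l : List Char) (c : Char) (s : Int),
    (PySem.List.enumerate l s).filterMap (fun p => if p.2 = c then some p.1 else none) =
      (occN l c).map (fun (k : Nat) => s + (k : Int)) := by
  intro l
  induction l with
  | nil => intro c s; simp [occN, PySem.List.enumerate_nil]
  | cons x t ih =>
    intro c s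
    rw [PySem.List.enumerate_cons]
    have hocc : occN (x :: t) c = (if x = c then [0] else []) ++ (occN t c).map (· + 1) := by
      unfold occN
      simp only [List.length_cons, List.range_succ_eq_map, List.filter_cons]
      by_cases hx : x = c
      · simp [hx, List.filter_map, Function.comp_def]
      · simp [hx, List.filter_map, Function.comp_def]
    rw [List.filterMap_cons, hocc]
    by_cases hx : x = c
    · simp only [hx, ih c (s + 1)]
      simp [List.map_map, Function.comp_def]
      intro a ha; ring
    · simp only [if_neg hx, ih c (s + 1)]
      simp [List.map_map, Function.comp_def]
      intro a ha; ring
lemma occ_eq (l : List Char) (c : Char) :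
    helperB_occ l c = (occN l c).map (fun (k : Nat) => (k : Int)) := by
  have := occF l c 0
  unfold helperB_occ
  simpa using this
lemma mem_occN (l : List Char) (c : Char) (k : Nat) :
    k ∈ occN l c ↔ ∃ h : k < l.length, l[k] = c := by
  unfold occN
  simp only [List.mem_filter, List.mem_range, beq_iff_eq]
  constructor
  · rintro ⟨hk, he⟩
    exact ⟨hk, by rwa [List.getD_eq_getElem l 'a' hk] at he⟩
  · rintro ⟨hk, he⟩
    exact ⟨hk, by rwa [List.getD_eq_getElem l 'a' hk]⟩
lemma occN_pairwise (l : List Char) (c : Char) : (occN l c).Pairwise (· < ·) :=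
  List.Pairwise.filter _ (List.pairwise_lt_range)
lemma foldB_le_init (l : List Char) : ∀ (xs : List Char) (I : Int),
    List.foldl (helperB_step l) I xs ≤ I := by
  intro xs
  induction xs with
  | nil => intro I; simp
  | cons x t ih =>
    intro I
    simp only [List.foldl_cons]
    calc List.foldl (helperB_step l) (helperB_step l I x) t ≤ helperB_step l I x := ih _
      _ ≤ I := by unfold helperB_step; dsimp only; split_ifs <;> simp

lemma foldB_le (l : List Char) : ∀ (xs : List Char) (I : Int) (c : Char), c ∈ xs →
    1 < (helperB_occ l c).length →
    List.foldl (helperB_step l) I xs ≤ (PySem.List.pyGet? (helperB_occ l c) 1).getD 0 := by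
  intro xs
  induction xs with
  | nil => intro I c h; simp at h
  | cons x t ih =>
    intro I c hmem hlen
    simp only [List.foldl_cons]
    rcases List.mem_cons.mp hmem with rfl | hmem'
    · calc List.foldl (helperB_step l) (helperB_step l I c) t ≤ helperB_step l I c :=
            foldB_le_init l t _
        _ ≤ _ := by unfold helperB_step; dsimp only; rw [if_pos hlen]; simp
    · exact ih _ c hmem' hlen

lemma foldB_cases (l : List Char) : ∀ (xs : List Char) (I : Int),
    List.foldl (helperB_step l) I xs = I ∨ ∃ c ∈ xs, 1 < (helperB_occ l c).length ∧
      List.foldl (helperB_step l) I xs = (PySem.List.pyGet? (helperB_occ l c) 1).getD 0 := by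
  intro xs
  induction xs with
  | nil => intro I; left; rfl
  | cons x t ih =>
    intro I
    simp only [List.foldl_cons]
    rcases ih (helperB_step l I x) with h | ⟨c, hc, hl, he⟩
    · rw [h]
      unfold helperB_step
      dsimp only
      split_ifs with hx
      · rcases le_or_gt I ((PySem.List.pyGet? (helperB_occ l x) 1).getD 0) with hle | hlt
        · left; simp [min_eq_left hle]
        · right; exact ⟨x, List.mem_cons_self .., hx, min_eq_right hlt.le⟩
      · left; rfl
    · right; exact ⟨c, List.mem_cons_of_mem _ hc, hl, he⟩
lemma occ_len (l : List Char) (c : Char) :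
    (helperB_occ l c).length = (occN l c).length := by rw [occ_eq]; simp

lemma occ_val (l : List Char) (c : Char) (h : 1 < (occN l c).length) :
    (PySem.List.pyGet? (helperB_occ l c) 1).getD 0 = ((occN l c)[1] : Int) := by
  rw [occ_eq]
  have h1 : (1 : Int) = ((1 : Nat) : Int) := rfl
  rw [h1, PySem.List.pyGet?_natCast, List.getElem?_map, List.getElem?_eq_getElem (by simpa using h)]
  rfl

-- second occurrence is ≤ any duplicate position k (one with an earlier equal element)
lemma occ_second_le (l : List Char) (c : Char) (j k : Nat) (hjk : j < k) (hk : k < l.length)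
    (hjc : l[j]'(by omega) = c) (hkc : l[k] = c) :
    1 < (occN l c).length ∧ ∀ h : 1 < (occN l c).length, (occN l c)[1] ≤ k := by
  have hjm : j ∈ occN l c := (mem_occN l c j).mpr ⟨by omega, hjc⟩
  have hkm : k ∈ occN l c := (mem_occN l c k).mpr ⟨hk, hkc⟩
  have hpw := occN_pairwise l c
  have hsorted := List.pairwise_iff_getElem.mp hpw
  obtain ⟨ij, hij, hije⟩ := List.mem_iff_getElem.mp hjm
  obtain ⟨ik, hik, hike⟩ := List.mem_iff_getElem.mp hkm
  have hne : ij ≠ ik := by rintro rfl; omega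
  have h0k : 1 ≤ ik := by
    rcases Nat.eq_zero_or_pos ik with h0 | h1
    · exfalso
      subst h0
      rcases Nat.eq_zero_or_pos ij with h0' | h1'
      · subst h0'; omega
      · have := hsorted 0 ij hik hij h1'
        omega
    · omega
  have hlen : 1 < (occN l c).length := by omega
  refine ⟨hlen, fun h => ?_⟩
  rcases Nat.lt_or_ge 1 ik with hgt | hle
  · have := hsorted 1 ik h hik hgt
    omega
  · have hik1 : (occN l c)[1]'h = (occN l c)[ik]'hik := by congr 1; omega
    exact le_of_eq (hik1.trans hike)

lemma B_eq_fgo (l : List Char) :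
    List.foldl (helperB_step l) (l.length : Int) (PySem.Set.ofList l) = (fgo [] l : Int) := by
  obtain ⟨hFle, hFnd, hFel⟩ := fgo_spec l [] List.nodup_nil
  simp only [List.nil_append] at hFnd hFel
  set F := fgo [] l with hFdef
  by_cases hF : F < l.length
  · -- there is a duplicate at position F
    set c := l[F] with hcdef
    obtain ⟨j, hjm, hje⟩ := List.mem_take_iff_getElem.mp (hFel hF)
    have hjF : j < F := by omega
    obtain ⟨hOlen, hOle⟩ := occ_second_le l c j F hjF hF hje rfl
    have hOlen' : 1 < (helperB_occ l c).length := by rw [occ_len]; exact hOlen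
    have hBle : List.foldl (helperB_step l) (l.length : Int) (PySem.Set.ofList l) ≤ (F : Int) := by
      calc List.foldl (helperB_step l) (l.length : Int) (PySem.Set.ofList l)
          ≤ (PySem.List.pyGet? (helperB_occ l c) 1).getD 0 :=
            foldB_le l _ _ c ((PySem.Set.mem_ofList l c).mpr (List.getElem_mem hF)) hOlen'
        _ = ((occN l c)[1]'hOlen : Int) := occ_val l c hOlen
        _ ≤ (F : Int) := by exact_mod_cast hOle hOlen
    have hBge : (F : Int) ≤ List.foldl (helperB_step l) (l.length : Int) (PySem.Set.ofList l) := by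
      rcases foldB_cases l (PySem.Set.ofList l) (l.length : Int) with hI | ⟨c', _, hl', he'⟩
      · rw [hI]; exact_mod_cast hFle
      · have hl'' : 1 < (occN l c').length := by rw [← occ_len]; exact hl'
        rw [he', occ_val l c' hl'']
        -- (occN l c')[1] is a duplicate position, so F ≤ it
        set k := (occN l c')[1]'hl'' with hkdef
        have hkm : k ∈ occN l c' := by rw [hkdef]; exact List.getElem_mem hl''
        obtain ⟨hk, hkc⟩ := (mem_occN l c' k).mp hkm
        have hj0m : (occN l c')[0]'(by omega) ∈ occN l c' := List.getElem_mem _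
        obtain ⟨hj0, hj0c⟩ := (mem_occN l c' _).mp hj0m
        have hj0k : (occN l c')[0]'(by omega) < k :=
          (List.pairwise_iff_getElem.mp (occN_pairwise l c')) 0 1 (by omega) hl'' (by omega)
        -- minimality of F over duplicate positions
        have hFk : F ≤ k := by
          by_contra hcon
          rw [not_le] at hcon
          have h1 : (l.take F)[(occN l c')[0]'(by omega)]'(by simp; omega) =
              (l.take F)[k]'(by simp; omega) := by
            rw [List.getElem_take, List.getElem_take, hj0c, hkc]
          have := (List.Nodup.getElem_inj_iff hFnd).mp h1
          omega
        exact_mod_cast hFk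
    omega
  · -- no duplicate at all: F = l.length, the list is Nodup, no candidate fires
    have hFeq : F = l.length := by omega
    have hnd : l.Nodup := by
      have := hFnd
      rw [hFeq, List.take_length] at this
      exact this
    rcases foldB_cases l (PySem.Set.ofList l) (l.length : Int) with hI | ⟨c', _, hl', _⟩
    · rw [hI, hFeq]
    · exfalso
      have hl'' : 1 < (occN l c').length := by rw [← occ_len]; exact hl'
      have h01 : (occN l c')[0]'(by omega) < (occN l c')[1]'hl'' :=
        (List.pairwise_iff_getElem.mp (occN_pairwise l c')) 0 1 (by omega) hl'' (by omega)
      obtain ⟨h0, h0c⟩ := (mem_occN l c' _).mp (List.getElem_mem (show 0 < (occN l c').length by omega))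
      obtain ⟨h1, h1c⟩ := (mem_occN l c' _).mp (List.getElem_mem hl'')
      have := (List.Nodup.getElem_inj_iff hnd).mp (h0c.trans h1c.symm)
      omega

-- ===== VERDICT =====
theorem helper_spec : Claim_equal_helper := by
  intro s start _ hpre
  unfold Pre_helper at hpre
  unfold Spec_helper helper helper_alt
  by_cases hle : start ≤ (s.toList.length : Int)
  · have hlen := chars_len s.toList (((s.toList.length : Int) - start).toNat) start hpre (by omega)
    have hA := A_eq_fgo s.toList start hpre (((s.toList.length : Int) - start).toNat) start
      PySem.Set.empty [] le_rfl hle (by omega)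
      (by intro c; simp [PySem.Set.contains, PySem.Set.empty])
    rw [hA]
    have hcast : ((helperB_chars s.toList start).length : Int) = (s.toList.length : Int) - start := by
      rw [hlen]; omega
    rw [show (s.toList.length : Int) - start = ((helperB_chars s.toList start).length : Int) from hcast.symm]
    rw [B_eq_fgo]
    ring
  · have hnil : PySem.List.pyRange start (s.toList.length : Int) = [] :=
      PySem.List.pyRange_one_eq_nil (by omega)
    have hch : helperB_chars s.toList start = [] := by
      unfold helperB_chars; rw [hnil]; rfl
    rw [hnil, hch]
    simp [helperA_go, PySem.Set.ofList]
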